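-- pv_equiv track=rewrite | github.com/ialeksandrov/aoc2021 | day_18.py | gen_flatlist
-- ===== SOURCE A (Python) =====
-- def gen_flatlist(puzzle):
--   flatlist = []
--   for line in puzzle:
--     flatline, depth = [], 0
--     for c in line:
--       if c == '[':       depth += 1
--       elif c == ']':     depth -= 1
--       elif c.isdigit():  flatline.append([int(c), depth])
--     flatlist.append(flatline)
--   return flatlist
-- ===== SOURCE B (Python) =====
-- def gen_flatlist(puzzle):
--     # For each digit, its depth is the number of '[' minus the number of ']'
--     # strictly before it; compute that by direct substring counting, with no
--     # running depth state at all.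
--     return [
--         [[int(c), line.count('[', 0, i) - line.count(']', 0, i)]
--          for i, c in enumerate(line) if c.isdigit()]
--         for line in puzzle
--     ]
-- ===== Notes on version B (the rewrite author's own statement) =====
-- stated objective: alternative
-- what changed: B keeps no running depth state: each digit's depth is computed independently as line.count('[',0,i) - line.count(']',0,i) over the prefix before it, via enumerate/filter, instead of A's stateful left-to-right scan with a mutated depth counter.
import Mathlib
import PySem

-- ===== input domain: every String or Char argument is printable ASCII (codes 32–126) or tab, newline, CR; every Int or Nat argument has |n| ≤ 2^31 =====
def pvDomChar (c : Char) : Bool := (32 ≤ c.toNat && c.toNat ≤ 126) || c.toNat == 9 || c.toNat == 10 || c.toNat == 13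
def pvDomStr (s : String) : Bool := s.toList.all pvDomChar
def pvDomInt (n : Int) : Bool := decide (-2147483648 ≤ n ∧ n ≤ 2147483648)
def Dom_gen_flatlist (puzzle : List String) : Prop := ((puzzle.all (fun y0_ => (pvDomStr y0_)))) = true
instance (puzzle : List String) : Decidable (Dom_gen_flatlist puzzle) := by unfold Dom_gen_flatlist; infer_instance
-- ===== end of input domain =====

-- B drops A's running depth counter: each digit's depth is recomputed independently by counting '[' and ']' in the prefix before it (alternative decomposition, not faster).


-- ===== PORT A =====
-- inner-loop step of A: state is (flatline, depth); int(c) on a digit char is c.toNat - 48 (exact for ASCII digits, which isdigit guards)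
def pvStepA (st : List (List Int) × Int) (c : Char) : List (List Int) × Int :=
  if c = '[' then (st.1, st.2 + 1)
  else if c = ']' then (st.1, st.2 - 1)
  else if PySem.Chars.isdigit c then (st.1 ++ [[((c.toNat : Int) - 48), st.2]], st.2)
  else st

def gen_flatlist (puzzle : List String) : List (List (List Int)) :=
  puzzle.foldl (fun flatlist line =>
    flatlist ++ [(line.toList.foldl pvStepA ([], 0)).1]) []

-- ===== PORT B =====
-- line.count('[', 0, i) - line.count(']', 0, i): bracket balance of the prefix before index i
def pvCnt (l : List Char) : Int := (l.count '[' : Int) - (l.count ']' : Int)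

def pvLineB (cs : List Char) : List (List Int) :=
  ((PySem.List.enumerate cs).filter (fun p => PySem.Chars.isdigit p.2)).map
    (fun p => [((p.2.toNat : Int) - 48), pvCnt (cs.take p.1.toNat)])

def gen_flatlist_alt (puzzle : List String) : List (List (List Int)) :=
  puzzle.map (fun line => pvLineB line.toList)

-- ===== PRECONDITION & SPEC =====
def Spec_gen_flatlist (puzzle : List String) (out : List (List (List Int))) : Prop := out = gen_flatlist_alt puzzle
instance (puzzle : List String) (out : List (List (List Int))) : Decidable (Spec_gen_flatlist puzzle out) := by unfold Spec_gen_flatlist; infer_instance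

-- ===== CLAIM =====
def Claim_equal_gen_flatlist : Prop := ∀ (puzzle : List String), Dom_gen_flatlist puzzle → Spec_gen_flatlist puzzle (gen_flatlist puzzle)

-- ===== LEMMAS AND PROOFS =====

-- canonical per-line result starting from depth d (proof-only intermediate form)
def pvBLine (cs : List Char) (d : Int) : List (List Int) :=
  match cs with
  | [] => []
  | c :: t =>
      (if PySem.Chars.isdigit c then [[((c.toNat : Int) - 48), d]] else []) ++
        pvBLine t (d + (if c = '[' then 1 else 0) - (if c = ']' then 1 else 0))

theorem pvStepA_eq_bline : ∀ (cs : List Char) (acc : List (List Int)) (d : Int),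
    (cs.foldl pvStepA (acc, d)).1 = acc ++ pvBLine cs d := by
  intro cs
  induction cs with
  | nil => intro acc d; simp [pvBLine]
  | cons c t ih =>
    intro acc d
    have hb : ¬ PySem.Chars.isdigit '[' := by decide
    have hb' : ¬ PySem.Chars.isdigit ']' := by decide
    rw [List.foldl_cons, pvBLine]
    by_cases h1 : c = '['
    · subst h1; simp [pvStepA, hb, ih]
    · by_cases h2 : c = ']'
      · subst h2; simp [pvStepA, hb', ih]
      · by_cases h3 : PySem.Chars.isdigit c
        · simp [pvStepA, h1, h2, h3, ih]
        · simp [pvStepA, h1, h2, h3, ih]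

theorem pvCnt_append_singleton (l : List Char) (c : Char) :
    pvCnt (l ++ [c]) = pvCnt l + (if c = '[' then 1 else 0) - (if c = ']' then 1 else 0) := by
  simp [pvCnt, List.count_append, List.count_singleton]
  by_cases h1 : c = '[' <;> by_cases h2 : c = ']' <;> simp_all <;> omega

theorem pvBLine_eq_count : ∀ (t pre : List Char),
    ((PySem.List.enumerate t (pre.length : Int)).filter (fun p => PySem.Chars.isdigit p.2)).map
      (fun p => [((p.2.toNat : Int) - 48), pvCnt ((pre ++ t).take p.1.toNat)])
      = pvBLine t (pvCnt pre) := by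
  intro t
  induction t with
  | nil => intro pre; simp [PySem.List.enumerate_nil, pvBLine]
  | cons c t ih =>
    intro pre
    rw [PySem.List.enumerate_cons, pvBLine]
    have htail := ih (pre ++ [c])
    have h1 : ((pre ++ [c]).length : Int) = (pre.length : Int) + 1 := by simp
    have h2 : (pre ++ [c]) ++ t = pre ++ c :: t := by simp
    rw [h1, h2, pvCnt_append_singleton] at htail
    have hhead : (pre ++ c :: t).take ((pre.length : Int)).toNat = pre := by
      simp
    rw [List.filter_cons]
    by_cases h3 : PySem.Chars.isdigit c
    · simp only [h3, if_pos, List.map_cons, hhead, htail]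
      simp
    · simp only [h3]
      exact htail

theorem pvLineB_eq (cs : List Char) : pvLineB cs = pvBLine cs 0 := by
  have := pvBLine_eq_count cs []
  simpa [pvLineB, pvCnt] using this

theorem pvFoldl_append_map : ∀ (ls : List String) (acc : List (List (List Int))),
    ls.foldl (fun flatlist line => flatlist ++ [(line.toList.foldl pvStepA ([], 0)).1]) acc
      = acc ++ ls.map (fun line => pvLineB line.toList) := by
  intro ls
  induction ls with
  | nil => intro acc; simp
  | cons l t ih =>
    intro acc
    rw [List.foldl_cons, ih]
    have : (l.toList.foldl pvStepA ([], 0)).1 = pvLineB l.toList := by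
      rw [pvStepA_eq_bline, pvLineB_eq]; rfl
    simp [this]

-- ===== VERDICT =====
theorem gen_flatlist_spec : Claim_equal_gen_flatlist := by
  intro puzzle _
  show gen_flatlist puzzle = gen_flatlist_alt puzzle
  rw [gen_flatlist, gen_flatlist_alt, pvFoldl_append_map]
  simp
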